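-- pv_equiv track=rewrite | github.com/ST4RKJR/Js- | 100DaysOfCode/Day58.py | even_odd_diff
-- ===== SOURCE A (Python) =====
-- def even_odd_diff(arr):
--     even_sum = 0
--     odd_sum = 0
--
--     for i in range(len(arr)):
--         if i % 2 == 0:  # Check if the index is even
--             even_sum += arr[i]
--         else:           # Else, it's odd
--             odd_sum += arr[i]
--
--     return even_sum - odd_sum
-- ===== SOURCE B (Python) =====
-- def even_odd_diff(arr):
--     it = iter(arr)
--     total = 0
--     for x in it:
--         total += x - next(it, 0)
--     return total
-- ===== Notes on version B (the rewrite author's own statement) =====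
-- stated objective: alternative
-- what changed: Replaced A's indexed loop over range(len(arr)) with a parity branch and two accumulators by a single iterator pass that consumes the list two elements at a time (total += x - next(it, 0)), removing all index arithmetic, parity tests and per-element subscripting.
import Mathlib
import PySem

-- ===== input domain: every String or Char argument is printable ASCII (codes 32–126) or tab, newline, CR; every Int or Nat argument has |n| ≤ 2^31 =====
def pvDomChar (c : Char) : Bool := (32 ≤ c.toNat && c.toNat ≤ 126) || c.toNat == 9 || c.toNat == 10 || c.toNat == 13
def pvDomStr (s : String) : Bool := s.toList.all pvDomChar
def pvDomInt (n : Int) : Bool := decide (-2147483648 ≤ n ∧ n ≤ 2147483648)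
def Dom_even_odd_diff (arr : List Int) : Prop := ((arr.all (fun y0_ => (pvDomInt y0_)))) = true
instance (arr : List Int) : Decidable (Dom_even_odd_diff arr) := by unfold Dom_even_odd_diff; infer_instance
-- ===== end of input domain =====

-- B replaces A's indexed parity-branch loop by one iterator pass consuming two elements at a time (no indexing or parity test; alternative decomposition, same O(n) cost).


-- ===== PORT A =====
-- literal transliteration: loop i over range(len(arr)), parity branch on i, two accumulators
def even_odd_diff (arr : List Int) : Int :=
  let p := (PySem.List.pyRange 0 arr.length 1).foldl
    (fun (st : Int × Int) i =>
      if PySem.Int.mod i 2 == 0 then (st.1 + PySem.List.pyGetD arr i 0, st.2)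
      else (st.1, st.2 + PySem.List.pyGetD arr i 0))
    (0, 0)
  p.1 - p.2

-- ===== PORT B =====
-- the 'for x in it: total += x - next(it, 0)' loop: consume the list two at a time with an accumulator
def pvPairLoop (total : Int) : List Int → Int
  | [] => total
  | [x] => total + (x - 0)
  | x :: y :: rest => pvPairLoop (total + (x - y)) rest

def even_odd_diff_alt (arr : List Int) : Int := pvPairLoop 0 arr

-- ===== PRECONDITION & SPEC =====
def Spec_even_odd_diff (arr : List Int) (out : Int) : Prop := out = even_odd_diff_alt arr
instance (arr : List Int) (out : Int) : Decidable (Spec_even_odd_diff arr out) := by unfold Spec_even_odd_diff; infer_instance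

-- ===== CLAIM (what is proved, stated in full; the proofs are below) =====
def Claim_equal_even_odd_diff : Prop := ∀ (arr : List Int), Dom_even_odd_diff arr → Spec_even_odd_diff arr (even_odd_diff arr)

-- ===== LEMMAS AND PROOFS =====

-- sum of the elements at even (b = true) resp. odd (b = false) positions
def pvSp (b : Bool) : List Int → Int
  | [] => 0
  | x :: xs => (if b then x else 0) + pvSp (!b) xs

theorem pvPairLoop_eq_sp : ∀ (l : List Int) (t : Int), pvPairLoop t l = t + (pvSp true l - pvSp false l)
  | [], t => by simp [pvPairLoop, pvSp]
  | [x], t => by simp [pvPairLoop, pvSp]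
  | x :: y :: rest, t => by
    rw [pvPairLoop, pvPairLoop_eq_sp rest]
    simp [pvSp]; ring

theorem pvAlt_eq_sp (l : List Int) : even_odd_diff_alt l = pvSp true l - pvSp false l := by
  simpa [even_odd_diff_alt] using pvPairLoop_eq_sp l 0

theorem pvLoopA (arr : List Int) : ∀ (m k : Nat) (e o : Int), k + m = arr.length →
    ((PySem.List.pyRange (k : Int) (arr.length : Int) 1).foldl
      (fun (st : Int × Int) i =>
        if PySem.Int.mod i 2 == 0 then (st.1 + PySem.List.pyGetD arr i 0, st.2)
        else (st.1, st.2 + PySem.List.pyGetD arr i 0))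
      (e, o))
    = (if k % 2 = 0 then (e + pvSp true (arr.drop k), o + pvSp false (arr.drop k))
       else (e + pvSp false (arr.drop k), o + pvSp true (arr.drop k))) := by
  intro m
  induction m with
  | zero =>
    intro k e o hk
    have hk' : k = arr.length := by omega
    subst hk'
    rw [PySem.List.pyRange_one_eq_nil le_rfl]
    simp [List.drop_eq_nil_of_le (le_refl arr.length), pvSp]
  | succ n ih =>
    intro k e o hk
    have hklt : k < arr.length := by omega
    rw [PySem.List.pyRange_one_cons (by exact_mod_cast hklt)]
    rw [List.foldl_cons]
    have hget : PySem.List.pyGetD arr (k : Int) 0 = arr[k] := by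
      rw [PySem.List.pyGetD_natCast]; simp [List.getD_eq_getElem?_getD, hklt]
    have hdrop : arr.drop k = arr[k] :: arr.drop (k + 1) := (List.getElem_cons_drop hklt).symm
    have hmod : PySem.Int.mod (k : Int) 2 = ((k % 2 : Nat) : Int) := by
      rw [PySem.Int.mod_eq_emod_of_pos (by omega)]
      push_cast
      rfl
    have hcast : ((k : Int) + 1) = ((k + 1 : Nat) : Int) := by push_cast; ring
    rw [hcast]
    by_cases hp : k % 2 = 0
    · rw [if_pos (by rw [hmod, hp]; rfl)]
      rw [ih (k + 1) _ _ (by omega)]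
      have hp1 : ¬ (k + 1) % 2 = 0 := by omega
      rw [if_pos hp, if_neg hp1, hdrop]
      simp [pvSp, hget, Prod.ext_iff]
      ring
    · rw [if_neg (by rw [hmod]; simp; omega)]
      rw [ih (k + 1) _ _ (by omega)]
      have hp1 : (k + 1) % 2 = 0 := by omega
      rw [if_neg hp, if_pos hp1, hdrop]
      simp [pvSp, hget, Prod.ext_iff]
      ring

-- ===== VERDICT (by name: the statement is the Claim_ definition above) =====
theorem even_odd_diff_spec : Claim_equal_even_odd_diff := by
  intro arr _
  unfold Spec_even_odd_diff even_odd_diff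
  have h := pvLoopA arr arr.length 0 0 0 (by omega)
  simp only [Nat.cast_zero] at h
  rw [h]
  simp [pvAlt_eq_sp]
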